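-- pv_equiv track=rewrite | github.com/arthur-ai/arthur-engine | genai-engine/src/services/chatbot/chatbot_prompts.py | search_api_index
-- ===== SOURCE A (Python) =====
-- from typing import Any, Dict, List, Optional
--
-- def search_api_index(index: List[str], query: str) -> str:
--     query_lower = query.lower()
--     terms = query_lower.split()
--     results = [line for line in index if all(t in line.lower() for t in terms)]
--     if not results:
--         # Fall back to any-term match
--         results = [line for line in index if any(t in line.lower() for t in terms)]
--     if not results:
--         return "No matching endpoints found."
--     return "\n".join(results[:20])
-- ===== SOURCE B (Python) =====
-- def search_api_index(index, query):
--     terms = query.lower().split()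
--     all_matches = []
--     any_matches = []
--     for line in index:
--         low = line.lower()
--         if all(t in low for t in terms):
--             all_matches.append(line)
--         elif any(t in low for t in terms):
--             any_matches.append(line)
--     results = all_matches if all_matches else any_matches
--     if not results:
--         return "No matching endpoints found."
--     return "\n".join(results[:20])
-- ===== Notes on version B (the rewrite author's own statement) =====
-- stated objective: alternative
-- what changed: Single fused pass over index that lowers each line once and buckets it into all-match/any-match lists, replacing A's two separate filtering comprehensions with fallback.
import Mathlib
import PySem

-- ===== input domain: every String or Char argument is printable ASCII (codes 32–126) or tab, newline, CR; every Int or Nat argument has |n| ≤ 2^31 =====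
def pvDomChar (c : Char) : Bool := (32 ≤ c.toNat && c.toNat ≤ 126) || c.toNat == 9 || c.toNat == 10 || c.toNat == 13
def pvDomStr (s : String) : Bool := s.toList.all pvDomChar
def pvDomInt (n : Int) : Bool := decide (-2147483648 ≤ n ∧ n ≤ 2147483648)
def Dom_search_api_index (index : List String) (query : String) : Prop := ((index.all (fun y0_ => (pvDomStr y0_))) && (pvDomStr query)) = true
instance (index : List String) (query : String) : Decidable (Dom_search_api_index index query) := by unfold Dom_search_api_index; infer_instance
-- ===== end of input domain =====

-- B replaces A's two filtering comprehensions (with fallback) by a single fused pass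
-- that lowers each line once and buckets it into all-match / any-match lists.


-- ===== PORT A =====
def search_api_index (index : List String) (query : String) : String :=
  let query_lower := PySem.Str.lower query
  let terms := PySem.Str.split₀ query_lower
  let results := index.filter (fun line => terms.all (fun t => PySem.Str.isIn t (PySem.Str.lower line)))
  let results :=
    if results.isEmpty then
      index.filter (fun line => terms.any (fun t => PySem.Str.isIn t (PySem.Str.lower line)))
    else results
  if results.isEmpty then "No matching endpoints found."
  else PySem.Str.join "\n" (PySem.List.slice results none (some 20))

-- ===== PORT B =====
def search_api_index_alt (index : List String) (query : String) : String :=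
  let terms := PySem.Str.split₀ (PySem.Str.lower query)
  let acc := index.foldl
    (fun (acc : List String × List String) line =>
      let low := PySem.Str.lower line
      if terms.all (fun t => PySem.Str.isIn t low) then (acc.1 ++ [line], acc.2)
      else if terms.any (fun t => PySem.Str.isIn t low) then (acc.1, acc.2 ++ [line])
      else acc)
    ([], [])
  let results := if acc.1.isEmpty then acc.2 else acc.1
  if results.isEmpty then "No matching endpoints found."
  else PySem.Str.join "\n" (PySem.List.slice results none (some 20))

-- ===== PRECONDITION & SPEC =====
def Spec_search_api_index (index : List String) (query : String) (out : String) : Prop := out = search_api_index_alt index query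
instance (index : List String) (query : String) (out : String) : Decidable (Spec_search_api_index index query out) := by unfold Spec_search_api_index; infer_instance

-- ===== CLAIM (what is proved, stated in full; the proofs are below) =====
def Claim_equal_search_api_index : Prop := ∀ (index : List String) (query : String), Dom_search_api_index index query → Spec_search_api_index index query (search_api_index index query)

-- ===== LEMMAS AND PROOFS =====

-- The bucketing fold of B computes (filter p, filter (¬p ∧ q)) appended to the accumulator.
lemma pv_fold_buckets (terms : List String) (index : List String) (a b : List String) :
    index.foldl
      (fun (acc : List String × List String) line =>
        let low := PySem.Str.lower line
        if terms.all (fun t => PySem.Str.isIn t low) then (acc.1 ++ [line], acc.2)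
        else if terms.any (fun t => PySem.Str.isIn t low) then (acc.1, acc.2 ++ [line])
        else acc)
      (a, b)
    = (a ++ index.filter (fun line => terms.all (fun t => PySem.Str.isIn t (PySem.Str.lower line))),
       b ++ index.filter (fun line =>
         !(terms.all (fun t => PySem.Str.isIn t (PySem.Str.lower line))) &&
         terms.any (fun t => PySem.Str.isIn t (PySem.Str.lower line)))) := by
  induction index generalizing a b with
  | nil => simp
  | cons x xs ih =>
    simp only [List.foldl_cons, List.filter_cons]
    cases h1 : terms.all (fun t => PySem.Str.isIn t (PySem.Str.lower x)) with
    | true =>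
      simp only [if_true, ih, Bool.not_true, Bool.false_and, Bool.false_eq_true, if_false,
        List.append_assoc, List.singleton_append]
    | false =>
      cases h2 : terms.any (fun t => PySem.Str.isIn t (PySem.Str.lower x)) with
      | true =>
        simp only [Bool.false_eq_true, if_false, if_true, ih, Bool.not_false,
          Bool.true_and, List.append_assoc, List.singleton_append]
      | false =>
        simp only [Bool.false_eq_true, if_false, ih, Bool.not_false, Bool.true_and]

-- ===== VERDICT (by name: the statement is the Claim_ definition above) =====
theorem search_api_index_spec : Claim_equal_search_api_index := by
  intro index query _
  show search_api_index index query = search_api_index_alt index query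
  unfold search_api_index search_api_index_alt
  simp only [pv_fold_buckets, List.nil_append]
  set terms := PySem.Str.split₀ (PySem.Str.lower query) with hterms
  set p := fun line => terms.all (fun t => PySem.Str.isIn t (PySem.Str.lower line)) with hp
  set q := fun line => terms.any (fun t => PySem.Str.isIn t (PySem.Str.lower line)) with hq
  by_cases h : (index.filter p).isEmpty
  · have hall : ∀ x ∈ index, ¬ p x = true := by
      intro x hx hpx
      have : x ∈ index.filter p := List.mem_filter.mpr ⟨hx, hpx⟩
      simp [List.isEmpty_iff.mp h] at this
    have : index.filter (fun line => !(p line) && q line) = index.filter q := by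
      apply List.filter_congr
      intro x hx
      simp [hall x hx]
    rw [if_pos h, if_pos h, this]
  · simp only [if_neg h]
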